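-- pv_equiv track=rewrite | github.com/mikeparcewski/wicked-garden | plugins/wicked-patch/scripts/generators/python_generator.py | _find_field_insertion_point
-- ===== SOURCE A (Python) =====
-- from typing import Any, Dict, List, Optional, Set
--
-- def _find_field_insertion_point(
--
--     lines: List[str],
--     class_start: int,
--     class_end: int,
--     class_type: str
-- ) -> int:
--     """Find where to insert a new field."""
--     last_field_line = class_start + 1
--
--     for i in range(class_start + 1, class_end + 1):
--         line = lines[i].strip()
--
--         # Skip empty lines, comments, docstrings
--         if not line or line.startswith("#") or line.startswith('"""') or line.startswith("'''"):
--             continue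
--
--         # Check for field patterns based on class type
--         if class_type == "sqlalchemy":
--             if "=" in line and ("Column(" in line or "mapped_column(" in line or "relationship(" in line):
--                 last_field_line = i
--         elif class_type == "pydantic" or class_type == "dataclass":
--             if ":" in line and not line.startswith("def "):
--                 last_field_line = i
--         else:
--             # Plain class - look for assignments
--             if "=" in line and not line.startswith("def "):
--                 last_field_line = i
--
--         # Stop at methods
--         if line.startswith("def "):
--             break
--
--     return last_field_line
-- ===== SOURCE B (Python) =====
-- def _is_field_line(line, class_type):
--     if class_type == "sqlalchemy":
--         return "=" in line and ("Column(" in line or "mapped_column(" in line or "relationship(" in line)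
--     if class_type == "pydantic" or class_type == "dataclass":
--         return ":" in line and not line.startswith("def ")
--     return "=" in line and not line.startswith("def ")
--
--
-- def _find_field_insertion_point(lines, class_start, class_end, class_type):
--     """Find where to insert a new field (two-phase scan)."""
--     # Phase 1: find the first method line; the scan stops there (inclusive).
--     stop = class_end
--     for i in range(class_start + 1, class_end + 1):
--         if lines[i].strip().startswith("def "):
--             stop = i
--             break
--     # Phase 2: walk backwards; the first field line found is the last one.
--     for i in reversed(range(class_start + 1, stop + 1)):
--         line = lines[i].strip()
--         if not line or line.startswith("#") or line.startswith('"""') or line.startswith("'''"):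
--             continue
--         if _is_field_line(line, class_type):
--             return i
--     return class_start + 1
-- ===== Notes on version B (the rewrite author's own statement) =====
-- stated objective: alternative
-- what changed: A's single forward pass that carries a running last-field accumulator and breaks at the first method is replaced by a two-phase scan: first find the first 'def' line to get the stop index, then walk backwards from it and return the first (i.e. last) field line found.
import Mathlib
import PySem

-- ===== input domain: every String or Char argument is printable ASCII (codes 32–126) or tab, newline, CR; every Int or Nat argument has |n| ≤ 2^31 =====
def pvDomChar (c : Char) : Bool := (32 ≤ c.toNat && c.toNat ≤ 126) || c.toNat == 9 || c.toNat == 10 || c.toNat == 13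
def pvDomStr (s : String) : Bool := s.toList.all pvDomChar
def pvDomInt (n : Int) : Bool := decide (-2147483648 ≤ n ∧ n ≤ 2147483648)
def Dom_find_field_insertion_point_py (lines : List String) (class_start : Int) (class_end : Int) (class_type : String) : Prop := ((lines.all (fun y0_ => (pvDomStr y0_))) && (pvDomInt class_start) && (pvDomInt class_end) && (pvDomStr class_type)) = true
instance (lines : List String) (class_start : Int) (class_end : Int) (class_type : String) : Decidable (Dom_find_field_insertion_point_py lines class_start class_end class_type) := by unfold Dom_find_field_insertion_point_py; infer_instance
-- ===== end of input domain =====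

-- B replaces A's single forward pass with break and a running last-match accumulator by a
-- two-phase scan (find the first method line, then walk backwards for the first field line);
-- objective: alternative decomposition, same cost.

-- ===== PORT A =====
-- literal port of A's forward loop; the `break` becomes returning the accumulator mid-list
def pvALoop (lines : List String) (class_type : String) : List Int → Int → Int
  | [], last_field_line => last_field_line
  | i :: rest, last_field_line =>
    let line := PySem.Str.strip ((PySem.List.pyGet? lines i).getD "")
    if (line == "") || PySem.Str.startswith line "#" || PySem.Str.startswith line "\"\"\"" || PySem.Str.startswith line "'''" then
      pvALoop lines class_type rest last_field_line
    else
      let lf :=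
        if class_type == "sqlalchemy" then
          if PySem.Str.isIn "=" line && (PySem.Str.isIn "Column(" line || PySem.Str.isIn "mapped_column(" line || PySem.Str.isIn "relationship(" line) then i else last_field_line
        else if class_type == "pydantic" || class_type == "dataclass" then
          if PySem.Str.isIn ":" line && !(PySem.Str.startswith line "def ") then i else last_field_line
        else
          if PySem.Str.isIn "=" line && !(PySem.Str.startswith line "def ") then i else last_field_line
      if PySem.Str.startswith line "def " then lf else pvALoop lines class_type rest lf

def find_field_insertion_point_py (lines : List String) (class_start : Int) (class_end : Int) (class_type : String) : Int :=
  pvALoop lines class_type (PySem.List.pyRange (class_start + 1) (class_end + 1) 1) (class_start + 1)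

-- ===== PORT B =====
def pvLineAt (lines : List String) (i : Int) : String :=
  PySem.Str.strip ((PySem.List.pyGet? lines i).getD "")

def pvIsDef (lines : List String) (i : Int) : Bool :=
  PySem.Str.startswith (pvLineAt lines i) "def "

def pvSkip (line : String) : Bool :=
  (line == "") || PySem.Str.startswith line "#" || PySem.Str.startswith line "\"\"\"" || PySem.Str.startswith line "'''"

def pvIsField (line : String) (class_type : String) : Bool :=
  if class_type == "sqlalchemy" then
    PySem.Str.isIn "=" line && (PySem.Str.isIn "Column(" line || PySem.Str.isIn "mapped_column(" line || PySem.Str.isIn "relationship(" line)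
  else if class_type == "pydantic" || class_type == "dataclass" then
    PySem.Str.isIn ":" line && !(PySem.Str.startswith line "def ")
  else
    PySem.Str.isIn "=" line && !(PySem.Str.startswith line "def ")

-- phase 1: first method line (default class_end)
def pvFindStop (lines : List String) (dflt : Int) : List Int → Int
  | [] => dflt
  | i :: rest => if pvIsDef lines i then i else pvFindStop lines dflt rest

-- phase 2: backward scan, first field line found
def pvBackScan (lines : List String) (class_type : String) : List Int → Option Int
  | [] => none
  | i :: rest =>
    let line := pvLineAt lines i
    if pvSkip line then pvBackScan lines class_type rest
    else if pvIsField line class_type then some i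
    else pvBackScan lines class_type rest

def find_field_insertion_point_py_alt (lines : List String) (class_start : Int) (class_end : Int) (class_type : String) : Int :=
  let stop := pvFindStop lines class_end (PySem.List.pyRange (class_start + 1) (class_end + 1) 1)
  match pvBackScan lines class_type ((PySem.List.pyRange (class_start + 1) (stop + 1) 1).reverse) with
  | some i => i
  | none => class_start + 1

-- ===== PRECONDITION & SPEC =====
-- Pre_ excludes exactly the IndexError inputs of A: a nonempty scan range whose first index is
-- below -len(lines), or one reaching len(lines) with no method line breaking the loop before that.
def Pre_find_field_insertion_point_py (lines : List String) (class_start : Int) (class_end : Int) (class_type : String) : Prop :=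
  class_end < class_start + 1 ∨
    (-(lines.length : Int) ≤ class_start + 1 ∧
      (class_end < (lines.length : Int) ∨
        (PySem.List.pyRange (class_start + 1) (lines.length : Int) 1).any (fun i => pvIsDef lines i) = true))
instance (lines : List String) (class_start : Int) (class_end : Int) (class_type : String) : Decidable (Pre_find_field_insertion_point_py lines class_start class_end class_type) := by unfold Pre_find_field_insertion_point_py; infer_instance

def pvWitness_find_field_insertion_point_py : List String × Int × Int × String :=
  (["class A:", "x = 1"], 0, 1, "")

def Spec_find_field_insertion_point_py (lines : List String) (class_start : Int) (class_end : Int) (class_type : String) (out : Int) : Prop := out = find_field_insertion_point_py_alt lines class_start class_end class_type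
instance (lines : List String) (class_start : Int) (class_end : Int) (class_type : String) (out : Int) : Decidable (Spec_find_field_insertion_point_py lines class_start class_end class_type out) := by unfold Spec_find_field_insertion_point_py; infer_instance

-- ===== CLAIM (what is proved, stated in full; the proofs are below) =====
def Claim_equal_find_field_insertion_point_py : Prop := ∀ (lines : List String) (class_start : Int) (class_end : Int) (class_type : String), Dom_find_field_insertion_point_py lines class_start class_end class_type → Pre_find_field_insertion_point_py lines class_start class_end class_type → Spec_find_field_insertion_point_py lines class_start class_end class_type (find_field_insertion_point_py lines class_start class_end class_type)

-- ===== LEMMAS AND PROOFS =====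

-- the prefix of the index list A actually processes: up to and including the first method line
def pvTake (lines : List String) : List Int → List Int
  | [] => []
  | i :: rest => if pvIsDef lines i then [i] else i :: pvTake lines rest

lemma pvBackScan_append (lines : List String) (class_type : String) (xs ys : List Int) :
    pvBackScan lines class_type (xs ++ ys) =
      (match pvBackScan lines class_type xs with
       | some j => some j
       | none => pvBackScan lines class_type ys) := by
  induction xs with
  | nil => simp [pvBackScan]
  | cons i rest ih =>
    simp only [List.cons_append, pvBackScan, ih]
    split_ifs <;> rfl

lemma pvPrefix_head {L t p : List Char} {c d : Char} (h1 : (c :: t) <+: L) (h2 : (d :: p) <+: L) :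
    c = d := by
  rcases h1 with ⟨t1, e1⟩
  rcases h2 with ⟨t2, e2⟩
  rw [← e1] at e2
  simpa using (congrArg (fun l => l.head?) e2).symm

lemma pvSkip_not_def (line : String) (h : pvSkip line = true) :
    PySem.Str.startswith line "def " = false := by
  rw [Bool.eq_false_iff]
  intro hdef
  have hdef' : ("def ".toList) <+: line.toList :=
    (PySem.Chars.startswith_iff _ _).mp (by simpa using hdef)
  unfold pvSkip at h
  simp only [Bool.or_eq_true, beq_iff_eq] at h
  rcases h with ((h | h) | h) | h
  · subst h; simp at hdef'
  · have h' : ("#".toList) <+: line.toList := (PySem.Chars.startswith_iff _ _).mp (by simpa using h)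
    exact absurd (pvPrefix_head hdef' h') (by decide)
  · have h' : ("\"\"\"".toList) <+: line.toList := (PySem.Chars.startswith_iff _ _).mp (by simpa using h)
    exact absurd (pvPrefix_head hdef' h') (by decide)
  · have h' : ("'''".toList) <+: line.toList := (PySem.Chars.startswith_iff _ _).mp (by simpa using h)
    exact absurd (pvPrefix_head hdef' h') (by decide)

lemma pvALoop_cons (lines : List String) (class_type : String) (i : Int) (rest : List Int) (last : Int) :
    pvALoop lines class_type (i :: rest) last =
      (if pvSkip (pvLineAt lines i) then pvALoop lines class_type rest last
       else
         let lf := if pvIsField (pvLineAt lines i) class_type then i else last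
         if pvIsDef lines i then lf else pvALoop lines class_type rest lf) := by
  simp only [pvALoop, pvSkip, pvLineAt, pvIsField, pvIsDef]
  split_ifs <;> rfl

lemma pvALoop_eq (lines : List String) (class_type : String) :
    ∀ (l : List Int) (last : Int),
      pvALoop lines class_type l last =
        (pvBackScan lines class_type ((pvTake lines l).reverse)).getD last := by
  intro l
  induction l with
  | nil => intro last; rfl
  | cons i rest ih =>
    intro last
    rw [pvALoop_cons]
    by_cases hs : pvSkip (pvLineAt lines i) = true
    · have hd : pvIsDef lines i = false := by unfold pvIsDef; exact pvSkip_not_def _ hs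
      rw [if_pos hs, ih]
      simp only [pvTake, hd, Bool.false_eq_true, if_false]
      rw [List.reverse_cons, pvBackScan_append]
      have hb : pvBackScan lines class_type [i] = none := by simp [pvBackScan, hs]
      rw [hb]
      cases pvBackScan lines class_type (pvTake lines rest).reverse <;> simp
    · rw [if_neg hs]
      simp only []
      by_cases hd : pvIsDef lines i = true
      · rw [if_pos hd]
        simp only [pvTake, hd, if_true, List.reverse_cons, List.reverse_nil, List.nil_append]
        have hb : pvBackScan lines class_type [i] =
            (if pvIsField (pvLineAt lines i) class_type then some i else none) := by
          simp [pvBackScan, hs]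
        rw [hb]
        split_ifs <;> rfl
      · rw [if_neg hd, ih]
        have hd' : pvIsDef lines i = false := by simpa using hd
        simp only [pvTake, hd', Bool.false_eq_true, if_false]
        rw [List.reverse_cons, pvBackScan_append]
        have hb : pvBackScan lines class_type [i] =
            (if pvIsField (pvLineAt lines i) class_type then some i else none) := by
          simp [pvBackScan, hs]
        rw [hb]
        cases pvBackScan lines class_type (pvTake lines rest).reverse <;>
          split_ifs <;> simp

lemma pvFindStop_mem_or (lines : List String) (dflt : Int) (l : List Int) :
    pvFindStop lines dflt l = dflt ∨ pvFindStop lines dflt l ∈ l := by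
  induction l with
  | nil => left; rfl
  | cons i rest ih =>
    simp only [pvFindStop]
    split_ifs with h
    · right; exact List.mem_cons_self
    · rcases ih with h' | h'
      · left; exact h'
      · right; exact List.mem_cons_of_mem _ h'

lemma pvTake_pyRange (lines : List String) :
    ∀ (n : Nat) (a b : Int), (b - a).toNat = n →
      pvTake lines (PySem.List.pyRange a b 1) =
        PySem.List.pyRange a (pvFindStop lines (b - 1) (PySem.List.pyRange a b 1) + 1) 1 := by
  intro n
  induction n with
  | zero =>
    intro a b h
    have hba : b ≤ a := by omega
    rw [PySem.List.pyRange_one_eq_nil hba]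
    rw [show pvFindStop lines (b - 1) [] = b - 1 from rfl]
    rw [show b - 1 + 1 = b by ring, PySem.List.pyRange_one_eq_nil hba]
    rfl
  | succ n ih =>
    intro a b h
    have hab : a < b := by omega
    rw [PySem.List.pyRange_one_cons hab]
    by_cases hd : pvIsDef lines a = true
    · simp only [pvTake, pvFindStop, hd, if_true]
      exact (PySem.List.pyRange_one_singleton a).symm
    · have hd' : pvIsDef lines a = false := by simpa using hd
      simp only [pvTake, pvFindStop, hd', Bool.false_eq_true, if_false]
      rw [ih (a + 1) b (by omega)]
      have hs : a < pvFindStop lines (b - 1) (PySem.List.pyRange (a + 1) b 1) + 1 := by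
        rcases pvFindStop_mem_or lines (b - 1) (PySem.List.pyRange (a + 1) b 1) with h' | h'
        · omega
        · have := PySem.List.mem_pyRange_one.mp h'
          omega
      rw [PySem.List.pyRange_one_cons hs]

-- ===== VERDICT (by name: the statement is the Claim_ definition above) =====
theorem find_field_insertion_point_py_spec : Claim_equal_find_field_insertion_point_py := by
  intro lines class_start class_end class_type _ _
  unfold Spec_find_field_insertion_point_py
  unfold find_field_insertion_point_py find_field_insertion_point_py_alt
  rw [pvALoop_eq, pvTake_pyRange lines ((class_end + 1) - (class_start + 1)).toNat _ _ rfl]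
  have h1 : class_end + 1 - 1 = class_end := by ring
  rw [h1]
  cases h : pvBackScan lines class_type
      ((PySem.List.pyRange (class_start + 1)
        (pvFindStop lines class_end (PySem.List.pyRange (class_start + 1) (class_end + 1) 1) + 1) 1).reverse) <;>
    simp [h]
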